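-- pv_equiv track=rewrite | github.com/FurkanGozukara/STAR | logic/context_processor.py | validate_chunk_plan
-- ===== SOURCE A (Python) =====
-- from typing import List, Tuple, Dict, Any, Optional
--
-- def validate_chunk_plan(chunks: List[Dict[str, Any]], total_frames: int) -> Tuple[bool, str]:
--     """
--     Validate that a chunk plan correctly covers all frames without gaps or overlaps in output.
--
--     Args:
--         chunks: List of chunk dictionaries
--         total_frames: Expected total frames to cover
--
--     Returns:
--         Tuple of (is_valid, error_message)
--     """
--     if not chunks:
--         return False, "No chunks provided"
--
--     if total_frames <= 0:
--         return False, "Total frames must be positive"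
--
--     # Check that output frames cover all frames exactly once
--     expected_outputs = set(range(total_frames))
--     actual_outputs = set()
--
--     for i, chunk in enumerate(chunks):
--         # Validate chunk structure
--         required_keys = ['process_start', 'process_end', 'output_start', 'output_end',
--                         'context_frames', 'new_frames', 'total_frames']
--         for key in required_keys:
--             if key not in chunk:
--                 return False, f"Chunk {i} missing key: {key}"
--
--         # Validate chunk ranges
--         if chunk['process_start'] > chunk['process_end']:
--             return False, f"Chunk {i} has invalid process range: start > end"
--
--         if chunk['output_start'] > chunk['output_end']:
--             return False, f"Chunk {i} has invalid output range: start > end"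
--
--         # Check that output range is within process range
--         if chunk['output_start'] < chunk['process_start'] or chunk['output_end'] > chunk['process_end']:
--             return False, f"Chunk {i} output range not within process range"
--
--         # Add output frames to our set
--         chunk_outputs = set(range(chunk['output_start'], chunk['output_end'] + 1))
--
--         # Check for overlaps
--         overlap = actual_outputs.intersection(chunk_outputs)
--         if overlap:
--             return False, f"Chunk {i} has overlapping output frames: {sorted(overlap)}"
--
--         actual_outputs.update(chunk_outputs)
--
--     # Check for gaps or missing frames
--     missing_frames = expected_outputs - actual_outputs
--     if missing_frames:
--         return False, f"Missing output frames: {sorted(missing_frames)}"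
--
--     extra_frames = actual_outputs - expected_outputs
--     if extra_frames:
--         return False, f"Extra output frames: {sorted(extra_frames)}"
--
--     return True, "Valid chunk plan"
-- ===== SOURCE B (Python) =====
-- def validate_chunk_plan(chunks, total_frames):
--     if not chunks:
--         return False, "No chunks provided"
--     if total_frames <= 0:
--         return False, "Total frames must be positive"
--     required_keys = ('process_start', 'process_end', 'output_start', 'output_end',
--                      'context_frames', 'new_frames', 'total_frames')
--     intervals = []
--     for i, chunk in enumerate(chunks):
--         missing_key = next((k for k in required_keys if k not in chunk), None)
--         if missing_key is not None:
--             return False, f"Chunk {i} missing key: {missing_key}"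
--         ps, pe = chunk['process_start'], chunk['process_end']
--         o1, o2 = chunk['output_start'], chunk['output_end']
--         if ps > pe:
--             return False, f"Chunk {i} has invalid process range: start > end"
--         if o1 > o2:
--             return False, f"Chunk {i} has invalid output range: start > end"
--         if o1 < ps or o2 > pe:
--             return False, f"Chunk {i} output range not within process range"
--         # frames shared with previously accepted (pairwise disjoint) intervals
--         overlap = sorted(f for a, b in intervals
--                          for f in range(max(a, o1), min(b, o2) + 1))
--         if overlap:
--             return False, f"Chunk {i} has overlapping output frames: {overlap}"
--         intervals.append((o1, o2))
--     # coverage check by interval bounds: sort by start, sweep a cursor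
--     intervals.sort(key=lambda p: p[0])
--     missing = []
--     cursor = 0
--     for a, b in intervals:
--         if a > cursor and cursor <= total_frames - 1:
--             missing.extend(range(cursor, min(a - 1, total_frames - 1) + 1))
--         cursor = max(cursor, b + 1)
--     if cursor <= total_frames - 1:
--         missing.extend(range(cursor, total_frames))
--     if missing:
--         return False, f"Missing output frames: {missing}"
--     extra = [f for a, b in intervals
--              for f in list(range(a, min(b, -1) + 1)) + list(range(max(a, total_frames), b + 1))]
--     if extra:
--         return False, f"Extra output frames: {extra}"
--     return True, "Valid chunk plan"
-- ===== Notes on version B (the rewrite author's own statement) =====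
-- stated objective: alternative
-- what changed: B replaces A's per-frame set bookkeeping (set(range(total_frames)) plus a growing set of all output frames) by a list of accepted (start, end) intervals: overlap is detected by clipping the new chunk against each stored interval, and coverage is checked by a cursor sweep over the start-sorted intervals, so frames are enumerated only to build error messages.
import Mathlib
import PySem

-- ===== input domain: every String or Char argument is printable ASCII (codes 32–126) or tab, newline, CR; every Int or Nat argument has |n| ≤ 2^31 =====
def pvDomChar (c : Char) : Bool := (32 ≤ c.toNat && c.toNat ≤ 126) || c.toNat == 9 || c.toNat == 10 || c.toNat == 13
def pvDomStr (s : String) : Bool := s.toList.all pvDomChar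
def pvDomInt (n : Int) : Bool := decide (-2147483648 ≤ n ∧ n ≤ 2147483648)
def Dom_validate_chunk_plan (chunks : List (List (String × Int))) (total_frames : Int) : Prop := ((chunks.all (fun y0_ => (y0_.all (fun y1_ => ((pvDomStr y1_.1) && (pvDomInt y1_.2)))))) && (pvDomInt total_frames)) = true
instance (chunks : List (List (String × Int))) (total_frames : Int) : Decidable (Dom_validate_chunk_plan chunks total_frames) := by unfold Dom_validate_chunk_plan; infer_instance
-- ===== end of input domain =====

-- ===== PORT A =====
-- B replaces A's per-frame sets by interval bookkeeping (overlap/coverage from interval bounds,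
-- frames enumerated only for error messages); objective: alternative algorithm (same observable results;
-- not claimed measurably faster).

-- str(list_of_ints), shared exact formatting helper ("[1, 2]"), used by both ports
def pyReprIntList (xs : List Int) : String :=
  "[" ++ PySem.Str.join ", " (xs.map PySem.Int.toStr) ++ "]"

def vcpRequiredKeys : List String :=
  ["process_start", "process_end", "output_start", "output_end",
   "context_frames", "new_frames", "total_frames"]

-- A's 'for key in required_keys: if key not in chunk: return …' as first-missing-key recursion
def vcpFirstMissing (d : PySem.Dict String Int) : List String → Option String
  | [] => none
  | k :: ks => if d.contains k then vcpFirstMissing d ks else some k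

def vcpLoopA (total_frames : Int) (expected : PySem.Set Int) :
    Int → List (List (String × Int)) → PySem.Set Int → Bool × String
  | _, [], actual =>
      let missing := PySem.Set.diff expected actual
      if missing ≠ [] then
        (false, "Missing output frames: " ++ pyReprIntList (PySem.List.sorted missing (fun x => x)))
      else
        let extra := PySem.Set.diff actual expected
        if extra ≠ [] then
          (false, "Extra output frames: " ++ pyReprIntList (PySem.List.sorted extra (fun x => x)))
        else (true, "Valid chunk plan")
  | i, c :: rest, actual =>
      let d := PySem.Dict.mk c
      match vcpFirstMissing d vcpRequiredKeys with
      | some k => (false, "Chunk " ++ PySem.Int.toStr i ++ " missing key: " ++ k)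
      | none =>
        if d.getD "process_start" 0 > d.getD "process_end" 0 then
          (false, "Chunk " ++ PySem.Int.toStr i ++ " has invalid process range: start > end")
        else if d.getD "output_start" 0 > d.getD "output_end" 0 then
          (false, "Chunk " ++ PySem.Int.toStr i ++ " has invalid output range: start > end")
        else if d.getD "output_start" 0 < d.getD "process_start" 0 ∨
                d.getD "output_end" 0 > d.getD "process_end" 0 then
          (false, "Chunk " ++ PySem.Int.toStr i ++ " output range not within process range")
        else
          -- set(range(o1, o2+1)): ofList of a duplicate-free range is the range itself
          -- (PySem.Set.ofList_eq_self_of_nodup, PySem.List.nodup_pyRange_one)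
          let chunk_outputs : PySem.Set Int := PySem.List.pyRange (d.getD "output_start" 0) (d.getD "output_end" 0 + 1) 1
          let overlap := PySem.Set.inter actual chunk_outputs
          if overlap ≠ [] then
            (false, "Chunk " ++ PySem.Int.toStr i ++ " has overlapping output frames: " ++
              pyReprIntList (PySem.List.sorted overlap (fun x => x)))
          else vcpLoopA total_frames expected (i + 1) rest (PySem.Set.update actual chunk_outputs)

def validate_chunk_plan (chunks : List (List (String × Int))) (total_frames : Int) : Bool × String :=
  if chunks = [] then (false, "No chunks provided")
  else if total_frames ≤ 0 then (false, "Total frames must be positive")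
  else
    -- set(range(total_frames)): ofList of a duplicate-free range is the range itself
    -- (PySem.Set.ofList_eq_self_of_nodup, PySem.List.nodup_pyRange_one)
    let expected : PySem.Set Int := PySem.List.pyRange 0 total_frames 1
    vcpLoopA total_frames expected 0 chunks []

-- ===== PORT B =====

-- cursor sweep over the start-sorted accepted intervals: gaps inside [0, total_frames)
def vcpMissScan (total_frames : Int) : Int → List (Int × Int) → List Int
  | cursor, [] =>
      if cursor ≤ total_frames - 1 then PySem.List.pyRange cursor total_frames 1 else []
  | cursor, (a, b) :: rest =>
      (if a > cursor ∧ cursor ≤ total_frames - 1 then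
        PySem.List.pyRange cursor (min (a - 1) (total_frames - 1) + 1) 1
      else []) ++ vcpMissScan total_frames (max cursor (b + 1)) rest

def vcpLoopB (total_frames : Int) :
    Int → List (List (String × Int)) → List (Int × Int) → Bool × String
  | _, [], intervals =>
      let ivs := PySem.List.sorted intervals (fun p => p.1)
      let missing := vcpMissScan total_frames 0 ivs
      if missing ≠ [] then
        (false, "Missing output frames: " ++ pyReprIntList missing)
      else
        let extra := ivs.flatMap (fun p =>
          PySem.List.pyRange p.1 (min p.2 (-1) + 1) 1 ++
          PySem.List.pyRange (max p.1 total_frames) (p.2 + 1) 1)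
        if extra ≠ [] then
          (false, "Extra output frames: " ++ pyReprIntList extra)
        else (true, "Valid chunk plan")
  | i, c :: rest, intervals =>
      let d := PySem.Dict.mk c
      match vcpRequiredKeys.find? (fun k => ! d.contains k) with
      | some k => (false, "Chunk " ++ PySem.Int.toStr i ++ " missing key: " ++ k)
      | none =>
        if d.getD "process_start" 0 > d.getD "process_end" 0 then
          (false, "Chunk " ++ PySem.Int.toStr i ++ " has invalid process range: start > end")
        else if d.getD "output_start" 0 > d.getD "output_end" 0 then
          (false, "Chunk " ++ PySem.Int.toStr i ++ " has invalid output range: start > end")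
        else if d.getD "output_start" 0 < d.getD "process_start" 0 ∨
                d.getD "output_end" 0 > d.getD "process_end" 0 then
          (false, "Chunk " ++ PySem.Int.toStr i ++ " output range not within process range")
        else
          let overlap := PySem.List.sorted (intervals.flatMap (fun p =>
            PySem.List.pyRange (max p.1 (d.getD "output_start" 0)) (min p.2 (d.getD "output_end" 0) + 1) 1)) (fun x => x)
          if overlap ≠ [] then
            (false, "Chunk " ++ PySem.Int.toStr i ++ " has overlapping output frames: " ++
              pyReprIntList overlap)
          else vcpLoopB total_frames (i + 1) rest (intervals ++ [(d.getD "output_start" 0, d.getD "output_end" 0)])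

def validate_chunk_plan_alt (chunks : List (List (String × Int))) (total_frames : Int) : Bool × String :=
  if chunks = [] then (false, "No chunks provided")
  else if total_frames ≤ 0 then (false, "Total frames must be positive")
  else vcpLoopB total_frames 0 chunks []

-- ===== PRECONDITION & SPEC =====
def Spec_validate_chunk_plan (chunks : List (List (String × Int))) (total_frames : Int) (out : Bool × String) : Prop := out = validate_chunk_plan_alt chunks total_frames
instance (chunks : List (List (String × Int))) (total_frames : Int) (out : Bool × String) : Decidable (Spec_validate_chunk_plan chunks total_frames out) := by unfold Spec_validate_chunk_plan; infer_instance

-- ===== CLAIM (what is proved, stated in full; the proofs are below) =====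
def Claim_equal_validate_chunk_plan : Prop := ∀ (chunks : List (List (String × Int))) (total_frames : Int), Dom_validate_chunk_plan chunks total_frames → Spec_validate_chunk_plan chunks total_frames (validate_chunk_plan chunks total_frames)

-- ===== LEMMAS AND PROOFS =====

-- the closed range [a, b] of an accepted interval
def vcpRng (p : Int × Int) : List Int := PySem.List.pyRange p.1 (p.2 + 1) 1

-- loop invariant tying A's frame set to B's interval list
def vcpInv (intervals : List (Int × Int)) (actual : PySem.Set Int) : Prop :=
  actual = intervals.flatMap vcpRng ∧ actual.Nodup ∧ ∀ p ∈ intervals, p.1 ≤ p.2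

theorem vcpFirstMissing_eq_find? (d : PySem.Dict String Int) (ks : List String) :
    vcpFirstMissing d ks = ks.find? (fun k => ! d.contains k) := by
  induction ks with
  | nil => rfl
  | cons k ks ih =>
      by_cases h : d.contains k = true <;> simp [vcpFirstMissing, List.find?, h, ih]

-- membership in A's frame set, through the invariant
theorem vcp_mem_actual {intervals : List (Int × Int)} {actual : PySem.Set Int}
    (hinv : vcpInv intervals actual) (x : Int) :
    x ∈ actual ↔ ∃ p ∈ intervals, p.1 ≤ x ∧ x ≤ p.2 := by
  rcases hinv with ⟨heq, -, -⟩
  subst heq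
  simp [List.mem_flatMap, vcpRng, PySem.List.mem_pyRange_one]

theorem vcp_pairwise_disjoint {intervals : List (Int × Int)} {actual : PySem.Set Int}
    (hinv : vcpInv intervals actual) :
    List.Pairwise (Function.onFun List.Disjoint vcpRng) intervals :=
  (List.nodup_flatMap.mp (hinv.1 ▸ hinv.2.1)).2

-- the start-sorted accepted intervals are separated: earlier ends strictly before later starts
theorem vcp_sorted_sep {intervals : List (Int × Int)} {actual : PySem.Set Int}
    (hinv : vcpInv intervals actual) :
    List.Pairwise (fun p q : Int × Int => p.2 < q.1)
      (PySem.List.sorted intervals (fun p => p.1)) := by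
  have hperm := PySem.List.sorted_perm intervals (fun p => p.1) false
  have hdisj : List.Pairwise (Function.onFun List.Disjoint vcpRng)
      (PySem.List.sorted intervals (fun p => p.1)) :=
    (List.Perm.pairwise_iff (fun h => List.Disjoint.symm h) hperm).mpr (vcp_pairwise_disjoint hinv)
  have hmem : ∀ p ∈ PySem.List.sorted intervals (fun p => p.1), p.1 ≤ p.2 :=
    fun p hp => hinv.2.2 p (hperm.subset hp)
  have hle := PySem.List.sorted_pairwise intervals (fun p => p.1)
  refine List.Pairwise.imp_of_mem ?_ (hdisj.and hle)
  intro p q hp hq hpq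
  rcases hpq with ⟨hd, hle'⟩
  by_contra hcon
  push Not at hcon
  have h2 := hmem q hq
  refine hd (a := q.1) ?_ ?_ <;>
    · simp only [vcpRng, PySem.List.mem_pyRange_one]
      omega

-- A's overlap set is a permutation of B's clipped-interval enumeration
theorem vcp_overlap_perm {intervals : List (Int × Int)} {actual : PySem.Set Int}
    (hinv : vcpInv intervals actual) (o1 o2 : Int) :
    (PySem.Set.inter actual (PySem.List.pyRange o1 (o2 + 1) 1)).Perm
      (intervals.flatMap (fun p => PySem.List.pyRange (max p.1 o1) (min p.2 o2 + 1) 1)) := by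
  have hsub : ∀ p : Int × Int, ∀ x : Int,
      x ∈ PySem.List.pyRange (max p.1 o1) (min p.2 o2 + 1) 1 → x ∈ vcpRng p := by
    intro p x hx
    simp only [PySem.List.mem_pyRange_one] at hx
    simp only [vcpRng, PySem.List.mem_pyRange_one]
    omega
  have hnd1 : (PySem.Set.inter actual (PySem.List.pyRange o1 (o2 + 1) 1)).Nodup :=
    List.Nodup.filter _ hinv.2.1
  have hnd2 : (intervals.flatMap (fun p => PySem.List.pyRange (max p.1 o1) (min p.2 o2 + 1) 1)).Nodup := by
    rw [List.nodup_flatMap]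
    refine ⟨fun p _ => PySem.List.nodup_pyRange_one _ _, ?_⟩
    refine (vcp_pairwise_disjoint hinv).imp ?_
    intro p q h x hx hx2
    exact h (hsub p x hx) (hsub q x hx2)
  rw [List.perm_ext_iff_of_nodup hnd1 hnd2]
  intro x
  simp only [PySem.Set.inter, List.mem_filter, List.mem_flatMap, PySem.List.mem_pyRange_one,
    PySem.Set.contains_iff, vcp_mem_actual hinv]
  constructor
  · rintro ⟨⟨p, hp, hx1, hx2⟩, hR⟩
    exact ⟨p, hp, by omega⟩
  · rintro ⟨p, hp, hx⟩
    exact ⟨⟨p, hp, by omega⟩, by omega⟩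

-- accepting a disjoint chunk preserves the invariant
theorem vcp_step_inv {intervals : List (Int × Int)} {actual : PySem.Set Int}
    (hinv : vcpInv intervals actual) {o1 o2 : Int} (h12 : o1 ≤ o2)
    (hemp : PySem.Set.inter actual (PySem.List.pyRange o1 (o2 + 1) 1) = []) :
    vcpInv (intervals ++ [(o1, o2)])
      (PySem.Set.update actual (PySem.List.pyRange o1 (o2 + 1) 1)) := by
  have hdisj : ∀ x ∈ actual, x ∉ PySem.List.pyRange o1 (o2 + 1) 1 := by
    intro x hx hxR
    have h := List.filter_eq_nil_iff.mp hemp x hx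
    rw [PySem.Set.contains_iff] at h
    exact h hxR
  rw [PySem.Set.update_eq_append_of_disjoint actual _ (PySem.List.nodup_pyRange_one _ _)
        (fun x hxR hxA => hdisj x hxA hxR)]
  refine ⟨?_, ?_, ?_⟩
  · rw [hinv.1]
    simp [vcpRng]
  · exact List.Nodup.append hinv.2.1 (PySem.List.nodup_pyRange_one _ _) hdisj
  · intro p hp
    rcases List.mem_append.mp hp with h | h
    · exact hinv.2.2 p h
    · simp only [List.mem_singleton] at h
      subst h
      exact h12

-- the cursor sweep enumerates exactly the uncovered frames of [c, t)
theorem vcp_scan_eq (t : Int) (M : List (Int × Int)) :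
    ∀ (c : Int), (∀ p ∈ M, p.1 ≤ p.2) →
    List.Pairwise (fun p q : Int × Int => p.2 < q.1) M →
    vcpMissScan t c M = (PySem.List.pyRange c t 1).filter
      (fun x => ! M.any (fun p => decide (p.1 ≤ x ∧ x ≤ p.2))) := by
  induction M with
  | nil =>
      intro c _ _
      simp only [vcpMissScan, List.any_nil, Bool.not_false, List.filter_true]
      split_ifs with h
      · rfl
      · rw [PySem.List.pyRange_one_eq_nil (by omega)]
  | cons p rest ih =>
      intro c hne hsep
      obtain ⟨a, b⟩ := p
      have hab : a ≤ b := hne (a, b) (by simp)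
      have hrest : ∀ q ∈ rest, b < q.1 := by simpa using (List.pairwise_cons.mp hsep).1
      have hne' : ∀ q ∈ rest, q.1 ≤ q.2 := fun q hq => hne q (by simp [hq])
      have hsep' := (List.pairwise_cons.mp hsep).2
      simp only [vcpMissScan]
      rw [ih (max c (b + 1)) hne' hsep']
      by_cases hct : c ≤ t
      · have hm1 : c ≤ max c (min a t) := by omega
        have hm1t : max c (min a t) ≤ t := by omega
        have hm2 : max c (min a t) ≤ max (max c (min a t)) (min (b + 1) t) := by omega
        have hm2t : max (max c (min a t)) (min (b + 1) t) ≤ t := by omega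
        rw [PySem.List.pyRange_one_append c (max c (min a t)) t hm1 hm1t,
            PySem.List.pyRange_one_append (max c (min a t)) (max (max c (min a t)) (min (b + 1) t)) t hm2 hm2t,
            List.filter_append, List.filter_append]
        have hpiece1 : (PySem.List.pyRange c (max c (min a t)) 1).filter
            (fun x => ! ((a, b) :: rest).any (fun p => decide (p.1 ≤ x ∧ x ≤ p.2)))
            = PySem.List.pyRange c (max c (min a t)) 1 := by
          apply List.filter_eq_self.mpr
          intro x hx
          simp only [PySem.List.mem_pyRange_one] at hx
          simp only [List.any_cons, Bool.not_eq_eq_eq_not, Bool.not_true, Bool.or_eq_false_iff,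
            decide_eq_false_iff_not, List.any_eq_false, Bool.not_eq_true]
          refine ⟨by omega, ?_⟩
          intro q hq
          have := hrest q hq
          omega
        have hpiece2 : (PySem.List.pyRange (max c (min a t)) (max (max c (min a t)) (min (b + 1) t)) 1).filter
            (fun x => ! ((a, b) :: rest).any (fun p => decide (p.1 ≤ x ∧ x ≤ p.2)))
            = [] := by
          apply List.filter_eq_nil_iff.mpr
          intro x hx
          simp only [PySem.List.mem_pyRange_one] at hx
          simp only [List.any_cons, Bool.not_eq_true, Bool.or_eq_false_iff,
            decide_eq_false_iff_not, Bool.not_eq_eq_eq_not, Bool.not_true, List.any_eq_false]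
          intro h
          exact absurd (by omega : a ≤ x ∧ x ≤ b) h.1
        have hr : PySem.List.pyRange (max (max c (min a t)) (min (b + 1) t)) t 1
            = PySem.List.pyRange (max c (b + 1)) t 1 := by
          by_cases hbt : b + 1 ≤ t
          · congr 1
            omega
          · rw [PySem.List.pyRange_one_eq_nil (by omega), PySem.List.pyRange_one_eq_nil (by omega)]
        have hpiece3 : (PySem.List.pyRange (max (max c (min a t)) (min (b + 1) t)) t 1).filter
            (fun x => ! ((a, b) :: rest).any (fun p => decide (p.1 ≤ x ∧ x ≤ p.2)))
            = (PySem.List.pyRange (max c (b + 1)) t 1).filter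
              (fun x => ! rest.any (fun p => decide (p.1 ≤ x ∧ x ≤ p.2))) := by
          rw [hr]
          apply List.filter_congr
          intro x hx
          simp only [PySem.List.mem_pyRange_one] at hx
          simp only [List.any_cons]
          have hcov : decide (a ≤ x ∧ x ≤ b) = false := by
            simp only [decide_eq_false_iff_not]
            omega
          rw [hcov]
          simp
        rw [hpiece1, hpiece2, hpiece3]
        have hemit : (if a > c ∧ c ≤ t - 1 then
              PySem.List.pyRange c (min (a - 1) (t - 1) + 1) 1 else [])
            = PySem.List.pyRange c (max c (min a t)) 1 := by
          split_ifs with h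
          · congr 1
            omega
          · rw [PySem.List.pyRange_one_eq_nil (by omega)]
        rw [hemit]
        simp
      · rw [PySem.List.pyRange_one_eq_nil (by omega : t ≤ c),
            PySem.List.pyRange_one_eq_nil (by omega : t ≤ max c (b + 1)),
            if_neg (by omega)]
        simp

theorem vcp_missing_sorted_eq {intervals : List (Int × Int)} {actual : PySem.Set Int}
    (hinv : vcpInv intervals actual) (t : Int) :
    PySem.List.sorted (PySem.Set.diff (PySem.List.pyRange 0 t 1) actual) (fun x => x)
      = vcpMissScan t 0 (PySem.List.sorted intervals (fun p => p.1)) := by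
  have hne : ∀ p ∈ PySem.List.sorted intervals (fun p => p.1), p.1 ≤ p.2 :=
    fun p hp => hinv.2.2 p ((PySem.List.sorted_perm intervals (fun p => p.1) false).subset hp)
  rw [vcp_scan_eq t _ 0 hne (vcp_sorted_sep hinv)]
  have hpair : List.Pairwise (· < ·) (PySem.Set.diff (PySem.List.pyRange 0 t 1) actual) :=
    List.Pairwise.filter _ (PySem.List.pairwise_lt_pyRange_one 0 t)
  rw [PySem.List.sorted_eq_of_perm_of_pairwise_lt _ _ _ (List.Perm.refl _) hpair]
  simp only [PySem.Set.diff]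
  apply List.filter_congr
  intro x hx
  congr 1
  apply Bool.coe_iff_coe.mp
  simp only [PySem.Set.contains_iff, List.any_eq_true, decide_eq_true_eq,
    (PySem.List.sorted_perm intervals (fun p => p.1) false).mem_iff, vcp_mem_actual hinv x]

theorem vcp_extra_sorted_eq {intervals : List (Int × Int)} {actual : PySem.Set Int}
    (hinv : vcpInv intervals actual) (t : Int) (ht : 0 < t) :
    PySem.List.sorted (PySem.Set.diff actual (PySem.List.pyRange 0 t 1)) (fun x => x)
      = (PySem.List.sorted intervals (fun p => p.1)).flatMap (fun p =>
          PySem.List.pyRange p.1 (min p.2 (-1) + 1) 1 ++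
          PySem.List.pyRange (max p.1 t) (p.2 + 1) 1) := by
  have hsep := vcp_sorted_sep hinv
  have hpw : List.Pairwise (· < ·)
      ((PySem.List.sorted intervals (fun p => p.1)).flatMap (fun p =>
        PySem.List.pyRange p.1 (min p.2 (-1) + 1) 1 ++
        PySem.List.pyRange (max p.1 t) (p.2 + 1) 1)) := by
    rw [List.pairwise_flatMap]
    constructor
    · intro p _
      rw [List.pairwise_append]
      refine ⟨PySem.List.pairwise_lt_pyRange_one _ _, PySem.List.pairwise_lt_pyRange_one _ _, ?_⟩
      intro x hx y hy
      simp only [PySem.List.mem_pyRange_one] at hx hy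
      omega
    · refine hsep.imp ?_
      intro p q h x hx y hy
      simp only [List.mem_append, PySem.List.mem_pyRange_one] at hx hy
      omega
  apply PySem.List.sorted_eq_of_perm_of_pairwise_lt _ _ _ ?_ hpw
  have hnd1 : (PySem.Set.diff actual (PySem.List.pyRange 0 t 1)).Nodup :=
    List.Nodup.filter _ hinv.2.1
  have hnd2 := List.Pairwise.imp (fun h => ne_of_lt h) hpw
  rw [List.perm_ext_iff_of_nodup hnd2 hnd1]
  intro x
  simp only [PySem.Set.diff, List.mem_filter, List.mem_flatMap, List.mem_append,
    PySem.List.mem_pyRange_one, Bool.not_eq_true', PySem.Set.contains_eq_listContains,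
    (PySem.List.sorted_perm intervals (fun p => p.1) false).mem_iff, vcp_mem_actual hinv x]
  constructor
  · rintro ⟨p, hp, hx⟩
    refine ⟨⟨p, hp, by omega⟩, ?_⟩
    rw [← Bool.not_eq_true, List.contains_iff_exists_mem_beq]
    simp only [beq_iff_eq, not_exists]
    intro y hy
    simp only [PySem.List.mem_pyRange_one] at hy
    omega
  · rintro ⟨⟨p, hp, hx⟩, hnc⟩
    have hxr : ¬ (0 ≤ x ∧ x < t) := by
      intro hcon
      rw [← Bool.not_eq_true, List.contains_iff_exists_mem_beq] at hnc
      exact hnc ⟨x, by simp [PySem.List.mem_pyRange_one]; omega⟩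
    exact ⟨p, hp, by omega⟩

theorem vcp_loop_eq (total_frames : Int) (ht : 0 < total_frames)
    (rest : List (List (String × Int))) :
    ∀ (i : Int) (intervals : List (Int × Int)) (actual : PySem.Set Int),
      vcpInv intervals actual →
      vcpLoopA total_frames (PySem.List.pyRange 0 total_frames 1) i rest actual
        = vcpLoopB total_frames i rest intervals := by
  induction rest with
  | nil =>
      intro i intervals actual hinv
      simp only [vcpLoopA, vcpLoopB]
      rw [← vcp_missing_sorted_eq hinv total_frames, ← vcp_extra_sorted_eq hinv total_frames ht]
      simp [PySem.List.sorted_eq_nil_iff]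
  | cons c rest ih =>
      intro i intervals actual hinv
      simp only [vcpLoopA, vcpLoopB, vcpFirstMissing_eq_find?]
      cases hfind : (vcpRequiredKeys.find? fun k => !(PySem.Dict.mk c).contains k) with
      | some k => rfl
      | none =>
          simp only []
          by_cases h1 : (PySem.Dict.mk c).getD "process_start" 0 > (PySem.Dict.mk c).getD "process_end" 0
          · simp [h1]
          by_cases h2 : (PySem.Dict.mk c).getD "output_start" 0 > (PySem.Dict.mk c).getD "output_end" 0
          · simp [h1, h2]
          by_cases h3 : (PySem.Dict.mk c).getD "output_start" 0 < (PySem.Dict.mk c).getD "process_start" 0 ∨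
                        (PySem.Dict.mk c).getD "output_end" 0 > (PySem.Dict.mk c).getD "process_end" 0
          · simp [h1, h2, h3]
          · simp only [if_neg h1, if_neg h2, if_neg h3]
            have hperm := vcp_overlap_perm hinv ((PySem.Dict.mk c).getD "output_start" 0) ((PySem.Dict.mk c).getD "output_end" 0)
            by_cases hov : PySem.Set.inter actual (PySem.List.pyRange ((PySem.Dict.mk c).getD "output_start" 0) ((PySem.Dict.mk c).getD "output_end" 0 + 1) 1) = []
            · have hflat : (intervals.flatMap (fun p => PySem.List.pyRange (max p.1 ((PySem.Dict.mk c).getD "output_start" 0)) (min p.2 ((PySem.Dict.mk c).getD "output_end" 0) + 1) 1)) = [] := by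
                have := hperm
                rw [hov] at this
                exact this.symm.eq_nil
              rw [if_neg (by simpa using hov),
                  if_neg (by simp [PySem.List.sorted_eq_nil_iff, hflat])]
              exact ih (i + 1) _ _ (vcp_step_inv hinv (by omega) hov)
            · have hflat : ¬ (intervals.flatMap (fun p => PySem.List.pyRange (max p.1 ((PySem.Dict.mk c).getD "output_start" 0)) (min p.2 ((PySem.Dict.mk c).getD "output_end" 0) + 1) 1)) = [] := by
                intro h
                exact hov (by rw [h] at hperm; exact hperm.eq_nil)
              rw [if_pos (by simpa using hov),
                  if_pos (by simp [PySem.List.sorted_eq_nil_iff, hflat])]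
              have hsorted : PySem.List.sorted (PySem.Set.inter actual (PySem.List.pyRange ((PySem.Dict.mk c).getD "output_start" 0) ((PySem.Dict.mk c).getD "output_end" 0 + 1) 1)) (fun x => x)
                  = PySem.List.sorted (intervals.flatMap (fun p => PySem.List.pyRange (max p.1 ((PySem.Dict.mk c).getD "output_start" 0)) (min p.2 ((PySem.Dict.mk c).getD "output_end" 0) + 1) 1)) (fun x => x) :=
                (PySem.List.sorted_id_eq_sorted_id_iff_perm _ _).mpr hperm
              rw [hsorted]

theorem validate_chunk_plan_eq (chunks : List (List (String × Int))) (total_frames : Int) :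
    validate_chunk_plan chunks total_frames = validate_chunk_plan_alt chunks total_frames := by
  unfold validate_chunk_plan validate_chunk_plan_alt
  by_cases h1 : chunks = [] <;> simp [h1]
  by_cases h2 : total_frames ≤ 0 <;> simp [h2]
  exact vcp_loop_eq total_frames (by omega) chunks 0 [] [] ⟨rfl, List.nodup_nil, by simp⟩

-- ===== VERDICT (by name: the statement is the Claim_ definition above) =====
theorem validate_chunk_plan_spec : Claim_equal_validate_chunk_plan := by
  intro chunks total_frames _
  unfold Spec_validate_chunk_plan
  exact validate_chunk_plan_eq chunks total_frames
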